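-- pv_equiv track=rewrite | github.com/Ko-udon/Algorithm | 프로그래머스/2/42626. 더 맵게/더 맵게.py | solution
-- ===== SOURCE A (Python) =====
-- import heapq
--
-- def solution(scoville, K):
--     answer = 0
--     heap = []
--
--     for s in scoville:
--         heapq.heappush(heap, s)
--     while heap[0] < K:
--         if len(heap) == 1:
--             return -1
--
--         n = heapq.heappop(heap)
--         t = heapq.heappop(heap)
--         heapq.heappush(heap, n + (t * 2))
--         answer += 1
--
--     return answer
-- ===== SOURCE B (Python) =====
-- def _pop_min(orig, i, mixed, j):
--     # both sequences are ascending from their cursors; take the smaller head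
--     if j < len(mixed) and (i >= len(orig) or mixed[j] <= orig[i]):
--         return mixed[j], i, j + 1
--     return orig[i], i + 1, j
--
--
-- def solution(scoville, K):
--     # merge technique: sort once; newly mixed values come out in ascending
--     # order, so a FIFO of products (read cursor j) replaces the heap entirely
--     orig = sorted(scoville)
--     mixed = []
--     i = j = 0
--     answer = 0
--     while True:
--         if j >= len(mixed) or (i < len(orig) and orig[i] <= mixed[j]):
--             m = orig[i]
--         else:
--             m = mixed[j]
--         if m >= K:
--             return answer
--         if (len(orig) - i) + (len(mixed) - j) == 1:
--             return -1
--         a, i, j = _pop_min(orig, i, mixed, j)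
--         b, i, j = _pop_min(orig, i, mixed, j)
--         mixed.append(a + b * 2)
--         answer += 1
-- ===== Notes on version B (the rewrite author's own statement) =====
-- stated objective: alternative
-- what changed: Drops the priority queue entirely: B sorts once and then runs a two-queue merge (cursor over the sorted originals + a FIFO of mixed products), exploiting the invariant that newly produced values come out in nondecreasing order, so the minimum is always one of the two queue heads and no heap sift or re-insertion is ever performed.
import Mathlib
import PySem

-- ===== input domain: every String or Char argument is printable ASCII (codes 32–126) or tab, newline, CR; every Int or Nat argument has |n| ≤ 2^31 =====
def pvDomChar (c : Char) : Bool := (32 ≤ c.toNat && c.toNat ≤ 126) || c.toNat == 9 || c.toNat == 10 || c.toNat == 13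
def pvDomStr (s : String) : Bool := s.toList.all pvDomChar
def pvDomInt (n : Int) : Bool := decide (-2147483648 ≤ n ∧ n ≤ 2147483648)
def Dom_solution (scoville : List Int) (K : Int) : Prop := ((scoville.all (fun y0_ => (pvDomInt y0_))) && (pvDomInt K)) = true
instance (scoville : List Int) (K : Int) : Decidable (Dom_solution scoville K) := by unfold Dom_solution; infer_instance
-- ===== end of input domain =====

-- B replaces A's binary heap by a sort + two-queue merge (mixed values are appended in
-- nondecreasing order, so a FIFO of products replaces the priority queue); return value only.


-- ===== PORT A =====
-- heapq._siftdown(heap, startpos, pos) with item = the value conceptually stored at pos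
-- (CPython reads it into a local before the loop; the loop bubbles it up past larger parents).
-- fuel = a totality guard only: pos strictly decreases, so fuel = pos never runs out.
def pvSiftdown (heap : List Int) (startpos pos : Nat) (item : Int) (fuel : Nat) : List Int :=
  match fuel with
  | 0 => heap.set pos item
  | fuel + 1 =>
    if startpos < pos then
      let parentpos := (pos - 1) / 2
      let parent := heap.getD parentpos 0
      if item < parent then
        pvSiftdown (heap.set pos parent) startpos parentpos item fuel
      else heap.set pos item
    else heap.set pos item

-- heapq.heappush
def pvHeappush (heap : List Int) (item : Int) : List Int :=
  pvSiftdown (heap ++ [item]) 0 heap.length item heap.length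

-- heapq._siftup(heap, pos): move the hole down along smaller children, then sift the
-- saved item back up (exactly CPython's strategy); newitem = the value at the hole.
-- fuel = a totality guard only: pos strictly increases towards heap.length.
def pvSiftupLoop (heap : List Int) (pos : Nat) (newitem : Int) (fuel : Nat) : List Int :=
  match fuel with
  | 0 => pvSiftdown heap 0 pos newitem pos
  | fuel + 1 =>
    if 2 * pos + 1 < heap.length then
      let childpos := 2 * pos + 1
      let rightpos := childpos + 1
      let c := if rightpos < heap.length ∧ ¬ heap.getD childpos 0 < heap.getD rightpos 0
               then rightpos else childpos
      pvSiftupLoop (heap.set pos (heap.getD c 0)) c newitem fuel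
    else pvSiftdown heap 0 pos newitem pos

-- heapq.heappop: pop the last element; if the heap is nonempty move it to the root and sift up.
-- (never called on an empty heap inside Pre_; the getD default is unreachable there)
def pvHeappop (heap : List Int) : Int × List Int :=
  let lastelt := heap.getD (heap.length - 1) 0
  let rest := heap.dropLast
  if rest.isEmpty then (lastelt, rest)
  else (rest.getD 0 0, pvSiftupLoop (rest.set 0 lastelt) 0 lastelt rest.length)

-- the while loop; each iteration shrinks the heap by one, so fuel = initial length suffices
def pvLoopA (heap : List Int) (K : Int) (answer : Int) (fuel : Nat) : Int :=
  match fuel with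
  | 0 => answer
  | fuel + 1 =>
    if heap.getD 0 0 < K then
      if heap.length = 1 then -1
      else
        let p1 := pvHeappop heap
        let p2 := pvHeappop p1.2
        pvLoopA (pvHeappush p2.2 (p1.1 + p2.1 * 2)) K (answer + 1) fuel
    else answer

def solution (scoville : List Int) (K : Int) : Int :=
  pvLoopA (scoville.foldl (fun h s => pvHeappush h s) []) K 0 scoville.length

-- ===== PORT B =====
-- Source B's _pop_min: both sequences ascending from their cursors; take the smaller head
def pvPopMinP (orig : List Int) (i : Nat) (mixed : List Int) (j : Nat) : Int × Nat × Nat :=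
  if j < mixed.length ∧ (orig.length ≤ i ∨ mixed.getD j 0 ≤ orig.getD i 0) then
    (mixed.getD j 0, i, j + 1)
  else
    (orig.getD i 0, i + 1, j)

-- Source B's while loop (sorted originals with read cursor i, FIFO of products with read cursor j)
def pvLoopBP (orig : List Int) (i : Nat) (mixed : List Int) (j : Nat)
    (K answer : Int) (fuel : Nat) : Int :=
  match fuel with
  | 0 => answer
  | fuel + 1 =>
    let m := if mixed.length ≤ j ∨ (i < orig.length ∧ orig.getD i 0 ≤ mixed.getD j 0)
             then orig.getD i 0 else mixed.getD j 0
    if K ≤ m then answer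
    else if (orig.length - i) + (mixed.length - j) = 1 then -1
    else
      let p1 := pvPopMinP orig i mixed j
      let p2 := pvPopMinP orig p1.2.1 mixed p1.2.2
      pvLoopBP orig p2.2.1 (mixed ++ [p1.1 + p2.1 * 2]) p2.2.2 K (answer + 1) fuel

def solution_alt (scoville : List Int) (K : Int) : Int :=
  pvLoopBP (PySem.List.sorted scoville (fun x => x) false) 0 [] 0 K 0 scoville.length

-- ===== PRECONDITION & SPEC =====
-- Pre_ excludes only the empty list, on which A raises IndexError at heap[0] (B raises there too).
def Pre_solution (scoville : List Int) (K : Int) : Prop := scoville ≠ []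
instance (scoville : List Int) (K : Int) : Decidable (Pre_solution scoville K) := by
  unfold Pre_solution; infer_instance

def pvWitness_solution : List Int × Int := ([1, 2, 3, 9, 10, 12], 7)

def Spec_solution (scoville : List Int) (K : Int) (out : Int) : Prop := out = solution_alt scoville K
instance (scoville : List Int) (K : Int) (out : Int) : Decidable (Spec_solution scoville K out) := by
  unfold Spec_solution; infer_instance

-- ===== CLAIM =====
def Claim_equal_solution : Prop := ∀ (scoville : List Int) (K : Int), Dom_solution scoville K → Pre_solution scoville K → Spec_solution scoville K (solution scoville K)

-- ===== LEMMAS AND PROOFS =====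

-- proof-side twins of the fueled sift helpers, by well-founded recursion (used only below)
def pvSiftdownW (heap : List Int) (startpos pos : Nat) (item : Int) : List Int :=
  if _h : startpos < pos then
    let parentpos := (pos - 1) / 2
    let parent := heap.getD parentpos 0
    if item < parent then
      pvSiftdownW (heap.set pos parent) startpos parentpos item
    else
      heap.set pos item
  else
    heap.set pos item
termination_by pos
decreasing_by omega

def pvSiftupW (heap : List Int) (pos : Nat) (newitem : Int) : List Int :=
  if _h : 2 * pos + 1 < heap.length then
    let childpos := 2 * pos + 1
    let rightpos := childpos + 1
    let c := if rightpos < heap.length ∧ ¬ heap.getD childpos 0 < heap.getD rightpos 0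
             then rightpos else childpos
    pvSiftupW (heap.set pos (heap.getD c 0)) c newitem
  else
    pvSiftdownW heap 0 pos newitem
termination_by heap.length - pos
decreasing_by
  simp only [List.length_set]
  split_ifs at * <;> omega

-- with enough fuel the fueled helpers compute their WF twins
lemma pv_siftdownF_eq (fuel : Nat) : ∀ (l : List Int) (sp pos : Nat) (item : Int),
    pos - sp ≤ fuel → pvSiftdown l sp pos item fuel = pvSiftdownW l sp pos item := by
  induction fuel with
  | zero =>
    intro l sp pos item h
    rw [pvSiftdownW]
    simp only [pvSiftdown]
    rw [dif_neg (by omega)]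
  | succ fuel ih =>
    intro l sp pos item h
    rw [pvSiftdownW]
    simp only [pvSiftdown]
    by_cases hsp : sp < pos
    · rw [if_pos hsp, dif_pos hsp]
      by_cases hi : item < l.getD ((pos - 1) / 2) 0
      · simp only [if_pos hi]
        exact ih _ _ _ _ (by omega)
      · simp only [if_neg hi]
    · rw [if_neg hsp, dif_neg hsp]

lemma pv_siftupF_eq (fuel : Nat) : ∀ (l : List Int) (pos : Nat) (item : Int),
    l.length - pos ≤ fuel → pvSiftupLoop l pos item fuel = pvSiftupW l pos item := by
  induction fuel with
  | zero =>
    intro l pos item h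
    rw [pvSiftupW]
    simp only [pvSiftupLoop]
    rw [dif_neg (by omega), pv_siftdownF_eq pos l 0 pos item (by omega)]
  | succ fuel ih =>
    intro l pos item h
    rw [pvSiftupW]
    simp only [pvSiftupLoop]
    by_cases hc : 2 * pos + 1 < l.length
    · rw [if_pos hc, dif_pos hc]
      refine ih _ _ _ ?_
      simp only [List.length_set]
      split_ifs <;> omega
    · rw [if_neg hc, dif_neg hc, pv_siftdownF_eq pos l 0 pos item (by omega)]


-- value at index i, getD style
lemma pv_getD_set_self (l : List Int) (i : Nat) (x : Int) (h : i < l.length) :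
    (l.set i x).getD i 0 = x := by
  simp [List.getD, h]

lemma pv_getD_set_ne (l : List Int) (i j : Nat) (x : Int) (h : i ≠ j) :
    (l.set i x).getD j 0 = l.getD j 0 := by
  simp [List.getD, List.getElem?_set, h]

lemma pv_getD_mem (l : List Int) (i : Nat) (h : i < l.length) : l.getD i 0 ∈ l := by
  rw [List.getD_eq_getElem l 0 h]; exact List.getElem_mem h

-- replacing one entry, as a permutation fact
lemma pv_perm_getD_cons_set (l : List Int) (j : Nat) (x : Int) (h : j < l.length) :
    (l.getD j 0 :: l.set j x).Perm (x :: l) := by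
  induction l generalizing j with
  | nil => simp at h
  | cons a t ih =>
    cases j with
    | zero => simpa using List.Perm.swap x a t
    | succ j =>
      simp only [List.getD_cons_succ, List.set_cons_succ]
      exact (List.Perm.swap a _ _).trans
        ((List.Perm.cons a (ih j (by simpa using h))).trans (List.Perm.swap x a t))

-- swapping two entries (the shape of every sift step)
lemma pv_perm_set_set (l : List Int) (i j : Nat) (x : Int) (hij : i ≠ j)
    (hi : i < l.length) (hj : j < l.length) :
    ((l.set i (l.getD j 0)).set j x).Perm (l.set i x) := by
  rw [List.perm_iff_count]
  intro y
  have h1 := List.perm_iff_count.1 (pv_perm_getD_cons_set (l.set i (l.getD j 0)) j x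
      (by simpa using hj)) y
  have h2 := List.perm_iff_count.1 (pv_perm_getD_cons_set l i (l.getD j 0) hi) y
  have h3 := List.perm_iff_count.1 (pv_perm_getD_cons_set l i x hi) y
  rw [pv_getD_set_ne l i j _ hij] at h1
  simp only [List.count_cons] at h1 h2 h3
  omega

lemma pv_siftdown_perm (l : List Int) (pos : Nat) (item : Int) (h : pos < l.length) :
    (pvSiftdownW l 0 pos item).Perm (l.set pos item) := by
  fun_induction pvSiftdownW l 0 pos item with
  | case1 l pos hp parentpos parent hlt ih =>
    have hpp : parentpos < pos := by omega
    have := ih (by simp only [List.length_set]; omega)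
    exact this.trans (pv_perm_set_set l pos parentpos item (by omega) h (by omega))
  | case2 => exact List.Perm.refl _
  | case3 => exact List.Perm.refl _

lemma pv_siftupLoop_perm (l : List Int) (pos : Nat) (item : Int) (h : pos < l.length) :
    (pvSiftupW l pos item).Perm (l.set pos item) := by
  fun_induction pvSiftupW l pos item with
  | case1 l pos hc childpos rightpos c ih =>
    have hcr : c < l.length ∧ pos < c := by
      simp only [c]; split_ifs with h2 <;> [exact ⟨h2.1, by omega⟩; exact ⟨hc, by omega⟩]
    have := ih (by simpa using hcr.1)
    exact this.trans (pv_perm_set_set l pos c item (by omega) h hcr.1)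
  | case2 l pos hc => exact pv_siftdown_perm l pos _ h

-- heap shape: every non-root entry is at least its parent
def PVIsHeap (l : List Int) : Prop :=
  ∀ i : Nat, i < l.length → 1 ≤ i → l.getD ((i - 1) / 2) 0 ≤ l.getD i 0

lemma pv_isHeap_root_min (l : List Int) (hl : PVIsHeap l) :
    ∀ i : Nat, i < l.length → l.getD 0 0 ≤ l.getD i 0 := by
  intro i
  induction i using Nat.strong_induction_on with
  | _ i ih =>
    intro hi
    rcases Nat.eq_zero_or_pos i with h0 | h1
    · subst h0; exact le_refl _
    · exact le_trans (ih ((i - 1) / 2) (by omega) (by omega)) (hl i hi h1)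

-- bubbling item up from the hole at pos yields a heap (Up-invariant)
lemma pv_siftdown_isHeap (l : List Int) (pos : Nat) (item : Int)
    (hpos : pos < l.length)
    (h1 : ∀ i, i < l.length → 1 ≤ i → i ≠ pos → (i - 1) / 2 ≠ pos →
          l.getD ((i - 1) / 2) 0 ≤ l.getD i 0)
    (h2 : ∀ i, i < l.length → 1 ≤ i → (i - 1) / 2 = pos → item ≤ l.getD i 0)
    (h3 : ∀ i, i < l.length → 1 ≤ i → (i - 1) / 2 = pos → 1 ≤ pos →
          l.getD ((pos - 1) / 2) 0 ≤ l.getD i 0) :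
    PVIsHeap (pvSiftdownW l 0 pos item) := by
  fun_induction pvSiftdownW l 0 pos item with
  | case1 l pos hp parentpos parent hlt ih =>
    apply ih
    · simp only [List.length_set]; omega
    · -- edges avoiding the new hole
      intro i hi h1i hne hpne
      simp only [List.length_set] at hi
      by_cases hip : i = pos
      · exact absurd (hip ▸ rfl) hpne
      · by_cases hpp : (i - 1) / 2 = pos
        · rw [hpp, pv_getD_set_self l pos parent hpos, pv_getD_set_ne l pos i parent (Ne.symm hip)]
          exact h3 i hi h1i hpp (by omega)
        · rw [pv_getD_set_ne l pos _ parent (fun hh => hpp hh.symm),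
              pv_getD_set_ne l pos i parent (Ne.symm hip)]
          exact h1 i hi h1i hip hpp
    · -- children of the new hole are at least item
      intro i hi h1i hpp
      simp only [List.length_set] at hi
      by_cases hip : i = pos
      · subst hip; rw [pv_getD_set_self l i parent hpos]; exact le_of_lt hlt
      · rw [pv_getD_set_ne l pos i parent (Ne.symm hip)]
        have := h1 i hi h1i hip (by omega)
        rw [hpp] at this
        exact le_trans (le_of_lt hlt) this
    · -- children of the new hole are at least the hole's parent
      intro i hi h1i hpp hp1
      simp only [List.length_set] at hi
      rw [pv_getD_set_ne l pos _ parent (show pos ≠ (parentpos - 1) / 2 by omega)]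
      by_cases hip : i = pos
      · subst hip
        rw [pv_getD_set_self l i parent hpos]
        exact h1 parentpos (by omega) hp1 (by omega) (by omega)
      · rw [pv_getD_set_ne l pos i parent (Ne.symm hip)]
        have h2' := h1 i hi h1i hip (by omega)
        rw [hpp] at h2'
        exact le_trans (h1 parentpos (by omega) hp1 (by omega) (by omega)) h2'
  | case2 l pos hp parentpos parent hlt =>
    intro i hi h1i
    simp only [List.length_set] at hi
    by_cases hip : i = pos
    · subst hip
      rw [pv_getD_set_self l i item hpos,
          pv_getD_set_ne l i _ item (show i ≠ (i - 1) / 2 by omega)]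
      exact not_lt.1 hlt
    · by_cases hpp : (i - 1) / 2 = pos
      · rw [hpp, pv_getD_set_self l pos item hpos, pv_getD_set_ne l pos i item (Ne.symm hip)]
        exact h2 i hi h1i hpp
      · rw [pv_getD_set_ne l pos _ item (fun hh => hpp hh.symm),
            pv_getD_set_ne l pos i item (Ne.symm hip)]
        exact h1 i hi h1i hip hpp
  | case3 l pos hp =>
    intro i hi h1i
    simp only [List.length_set] at hi
    have hip : i ≠ pos := by omega
    by_cases hpp : (i - 1) / 2 = pos
    · rw [hpp, pv_getD_set_self l pos item hpos, pv_getD_set_ne l pos i item (Ne.symm hip)]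
      exact h2 i hi h1i hpp
    · rw [pv_getD_set_ne l pos _ item (fun hh => hpp hh.symm),
          pv_getD_set_ne l pos i item (Ne.symm hip)]
      exact h1 i hi h1i hip hpp

-- moving the hole down to a leaf then sifting up yields a heap (Down-invariant)
lemma pv_siftupLoop_isHeap (l : List Int) (pos : Nat) (newitem : Int)
    (hpos : pos < l.length)
    (d1 : ∀ i, i < l.length → 1 ≤ i → i ≠ pos → (i - 1) / 2 ≠ pos →
          l.getD ((i - 1) / 2) 0 ≤ l.getD i 0)
    (d3 : ∀ i, i < l.length → 1 ≤ i → (i - 1) / 2 = pos → 1 ≤ pos →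
          l.getD ((pos - 1) / 2) 0 ≤ l.getD i 0) :
    PVIsHeap (pvSiftupW l pos newitem) := by
  fun_induction pvSiftupW l pos newitem with
  | case1 l pos hc childpos rightpos c ih =>
    have hcdef : c = if rightpos < l.length ∧ ¬ l.getD childpos 0 < l.getD rightpos 0
                     then rightpos else childpos := rfl
    have hclen : c < l.length ∧ pos < c ∧ (c - 1) / 2 = pos := by
      rw [hcdef]; split_ifs with hsp
      · exact ⟨hsp.1, by omega, by omega⟩
      · exact ⟨hc, by omega, by omega⟩
    have hcmin : ∀ j, j < l.length → (j - 1) / 2 = pos → 1 ≤ j → l.getD c 0 ≤ l.getD j 0 := by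
      intro j hj hjp hj1
      have hjcases : j = childpos ∨ j = rightpos := by omega
      rw [hcdef]; split_ifs with hsp
      · rcases hjcases with rfl | rfl
        · exact not_lt.1 hsp.2
        · exact le_refl _
      · rcases hjcases with rfl | rfl
        · exact le_refl _
        · rcases Classical.not_and_iff_not_or_not.1 hsp with hx | hx
          · omega
          · exact (not_not.1 hx).le
    apply ih
    · simp only [List.length_set]; exact hclen.1
    · intro i hi h1i hic hpc
      simp only [List.length_set] at hi
      by_cases hip : i = pos
      · subst hip
        rw [pv_getD_set_self l i _ hpos,
            pv_getD_set_ne l i _ _ (show i ≠ (i - 1) / 2 by omega)]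
        exact d3 c hclen.1 (by omega) hclen.2.2 (by omega)
      · rw [pv_getD_set_ne l pos i _ (Ne.symm hip)]
        by_cases hpp : (i - 1) / 2 = pos
        · rw [hpp, pv_getD_set_self l pos _ hpos]
          exact hcmin i hi hpp h1i
        · rw [pv_getD_set_ne l pos _ _ (fun hh => hpp hh.symm)]
          exact d1 i hi h1i hip hpp
    · intro i hi h1i hpp hc1
      simp only [List.length_set] at hi
      have hipos : i ≠ pos := by omega
      rw [show (c - 1) / 2 = pos from hclen.2.2, pv_getD_set_self l pos _ hpos,
          pv_getD_set_ne l pos i _ (Ne.symm hipos)]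
      have := d1 i hi h1i hipos (by omega)
      rw [hpp] at this
      exact this
  | case2 l pos hc =>
    apply pv_siftdown_isHeap l pos _ hpos d1 ?_ d3
    intro i hi h1i hpp
    omega

lemma pv_set_append_last (h : List Int) (x y : Int) :
    (h ++ [x]).set h.length y = h ++ [y] := by
  rw [List.set_append_right _ _ (le_refl _)]
  simp

lemma pv_getD_append (h : List Int) (x : Int) (j : Nat) (hj : j < h.length) :
    (h ++ [x]).getD j 0 = h.getD j 0 := by
  rw [List.getD_eq_getElem _ 0 (by simp; omega), List.getD_eq_getElem _ 0 hj,
      List.getElem_append_left hj]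

lemma pv_heappush_perm (h : List Int) (x : Int) : (pvHeappush h x).Perm (x :: h) := by
  unfold pvHeappush
  rw [pv_siftdownF_eq h.length (h ++ [x]) 0 h.length x (by omega)]
  have := pv_siftdown_perm (h ++ [x]) h.length x (by simp)
  rw [pv_set_append_last] at this
  exact this.trans (List.perm_append_singleton x h)

lemma pv_heappush_isHeap (h : List Int) (x : Int) (hh : PVIsHeap h) : PVIsHeap (pvHeappush h x) := by
  unfold pvHeappush
  rw [pv_siftdownF_eq h.length (h ++ [x]) 0 h.length x (by omega)]
  apply pv_siftdown_isHeap (h ++ [x]) h.length x (by simp)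
  · intro i hi h1i hne hpne
    simp only [List.length_append, List.length_cons, List.length_nil] at hi
    have hi' : i < h.length := by omega
    rw [pv_getD_append h x i hi', pv_getD_append h x _ (by omega)]
    exact hh i hi' h1i
  · intro i hi h1i hpp
    simp only [List.length_append, List.length_cons, List.length_nil] at hi
    omega
  · intro i hi h1i hpp hp1
    simp only [List.length_append, List.length_cons, List.length_nil] at hi
    omega

lemma pv_getD_dropLast (l : List Int) (j : Nat) (hj : j < l.length - 1) :
    l.dropLast.getD j 0 = l.getD j 0 := by
  rw [List.getD_eq_getElem _ 0 (by simp; omega), List.getD_eq_getElem _ 0 (by omega),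
      List.getElem_dropLast]

lemma pv_heappop_fst (h : List Int) (hh : h ≠ []) : (pvHeappop h).1 = h.getD 0 0 := by
  simp only [pvHeappop]
  split_ifs with he
  · have h0 := List.length_pos_of_ne_nil hh
    have h1 : h.length - 1 = 0 := by
      have := congrArg List.length (List.isEmpty_iff.1 he)
      simpa using this
    have hlen : h.length = 1 := by omega
    rw [hlen]
  · have h1 : h.dropLast ≠ [] := fun hx => he (List.isEmpty_iff.2 hx)
    have h2 := List.length_pos_of_ne_nil h1
    simp only [List.length_dropLast] at h2
    exact pv_getD_dropLast h 0 (by omega)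

lemma pv_heappop_perm (h : List Int) (hh : h ≠ []) : (pvHeappop h).2.Perm (h.drop 1) := by
  simp only [pvHeappop]
  split_ifs with he
  · have hdl : h.dropLast = [] := List.isEmpty_iff.1 he
    have h1 : h.length ≤ 1 := by
      have := congrArg List.length hdl
      simp at this; omega
    have hd1 : h.drop 1 = [] := by
      rw [← List.length_eq_zero_iff]; simp; omega
    rw [hd1, hdl]
  · have h1 : h.dropLast ≠ [] := fun hx => he (List.isEmpty_iff.2 hx)
    have h2 := List.length_pos_of_ne_nil h1
    have hlen2 : 2 ≤ h.length := by simp only [List.length_dropLast] at h2; omega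
    have hset : 0 < h.dropLast.length := by simp; omega
    rw [pv_siftupF_eq h.dropLast.length (h.dropLast.set 0 (h.getD (h.length - 1) 0)) 0
        (h.getD (h.length - 1) 0) (by simp)]
    have hperm1 := pv_siftupLoop_perm (h.dropLast.set 0 (h.getD (h.length - 1) 0)) 0
        (h.getD (h.length - 1) 0) (by simpa using hset)
    rw [List.set_set] at hperm1
    refine hperm1.trans ?_
    have hgl : h.getD (h.length - 1) 0 = h.getLast hh := by
      rw [List.getD_eq_getElem _ 0 (by omega), List.getLast_eq_getElem]
    rw [hgl]
    obtain ⟨a, t, rfl⟩ : ∃ a t, h = a :: t := by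
      cases h with
      | nil => exact absurd rfl hh
      | cons a t => exact ⟨a, t, rfl⟩
    have ht : t ≠ [] := by
      intro hx; subst hx; simp at hlen2
    have hdl : (a :: t).dropLast = a :: t.dropLast := List.dropLast_cons_of_ne_nil ht
    rw [hdl, List.getLast_cons ht]
    simp only [List.set_cons_zero, List.drop_one, List.tail_cons]
    have hp := (List.perm_append_singleton (t.getLast ht) t.dropLast).symm
    rw [List.dropLast_concat_getLast ht] at hp
    exact hp

lemma pv_heappop_isHeap (h : List Int) (hh : PVIsHeap h) : PVIsHeap (pvHeappop h).2 := by
  simp only [pvHeappop]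
  split_ifs with he
  · rw [List.isEmpty_iff.1 he]
    intro i hi h1i; simp at hi
  · have h1 : h.dropLast ≠ [] := fun hx => he (List.isEmpty_iff.2 hx)
    have h2 := List.length_pos_of_ne_nil h1
    have hlen2 : 2 ≤ h.length := by simp only [List.length_dropLast] at h2; omega
    rw [pv_siftupF_eq h.dropLast.length (h.dropLast.set 0 (h.getD (h.length - 1) 0)) 0
        (h.getD (h.length - 1) 0) (by simp)]
    apply pv_siftupLoop_isHeap _ 0 _ (by simp; omega)
    · intro i hi h1i hne hpne
      simp only [List.length_set, List.length_dropLast] at hi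
      rw [pv_getD_set_ne _ 0 i _ (by omega), pv_getD_set_ne _ 0 _ _ (by omega),
          pv_getD_dropLast h i (by omega), pv_getD_dropLast h _ (by omega)]
      exact hh i (by omega) h1i
    · intro i hi h1i hpp hp1
      omega

-- ===== B-side lemmas =====

-- cursor-free twins of the two-queue port, on explicit suffix lists (used only in proofs)
def pvPopMin (oq mq : List Int) : Int × List Int × List Int :=
  if mq ≠ [] ∧ (oq = [] ∨ mq.getD 0 0 ≤ oq.getD 0 0) then
    (mq.getD 0 0, oq, mq.drop 1)
  else
    (oq.getD 0 0, oq.drop 1, mq)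

-- Source B's while loop over the two queues (oq = remaining originals, mq = FIFO of products)
def pvLoopB (oq mq : List Int) (K : Int) (answer : Int) (fuel : Nat) : Int :=
  match fuel with
  | 0 => answer
  | fuel + 1 =>
    let m := if mq = [] ∨ (oq ≠ [] ∧ oq.getD 0 0 ≤ mq.getD 0 0)
             then oq.getD 0 0 else mq.getD 0 0
    if K ≤ m then answer
    else if oq.length + mq.length = 1 then -1
    else
      let p1 := pvPopMin oq mq
      let p2 := pvPopMin p1.2.1 p1.2.2
      pvLoopB p2.2.1 (p2.2.2 ++ [p1.1 + p2.1 * 2]) K (answer + 1) fuel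


lemma pv_getD_drop (l : List Int) (n : Nat) : (l.drop n).getD 0 0 = l.getD n 0 := by
  simp [List.getD, List.getElem?_drop]

-- the cursor loop computes the suffix-list loop
lemma pv_popMinP_bridge (orig mixed : List Int) (i j : Nat) (hj : j ≤ mixed.length) :
    (pvPopMinP orig i mixed j).1 = (pvPopMin (orig.drop i) (mixed.drop j)).1
  ∧ orig.drop (pvPopMinP orig i mixed j).2.1 = (pvPopMin (orig.drop i) (mixed.drop j)).2.1
  ∧ mixed.drop (pvPopMinP orig i mixed j).2.2 = (pvPopMin (orig.drop i) (mixed.drop j)).2.2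
  ∧ (pvPopMinP orig i mixed j).2.2 ≤ mixed.length := by
  have hcnd : (j < mixed.length ∧ (orig.length ≤ i ∨ mixed.getD j 0 ≤ orig.getD i 0))
      ↔ (mixed.drop j ≠ [] ∧ (orig.drop i = [] ∨
          (mixed.drop j).getD 0 0 ≤ (orig.drop i).getD 0 0)) := by
    rw [ne_eq, List.drop_eq_nil_iff, List.drop_eq_nil_iff, pv_getD_drop, pv_getD_drop]
    constructor
    · rintro ⟨h1, h2⟩; exact ⟨by omega, h2.imp (by omega) id⟩
    · rintro ⟨h1, h2⟩; exact ⟨by omega, h2.imp (by omega) id⟩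
  unfold pvPopMinP pvPopMin
  by_cases hc : j < mixed.length ∧ (orig.length ≤ i ∨ mixed.getD j 0 ≤ orig.getD i 0)
  · rw [if_pos hc, if_pos (hcnd.1 hc)]
    refine ⟨(pv_getD_drop mixed j).symm, rfl, ?_, ?_⟩
    · show mixed.drop (j + 1) = (mixed.drop j).drop 1
      rw [List.drop_drop, Nat.add_comm]
    · show j + 1 ≤ mixed.length
      omega
  · rw [if_neg hc, if_neg (fun hz => hc (hcnd.2 hz))]
    refine ⟨(pv_getD_drop orig i).symm, ?_, ?_⟩
    · show orig.drop (i + 1) = (orig.drop i).drop 1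
      rw [List.drop_drop, Nat.add_comm]
    · exact ⟨rfl, hj⟩

lemma pv_loopB_bridge (fuel : Nat) : ∀ (orig mixed : List Int) (i j : Nat) (K answer : Int),
    j ≤ mixed.length →
    pvLoopBP orig i mixed j K answer fuel = pvLoopB (orig.drop i) (mixed.drop j) K answer fuel := by
  induction fuel with
  | zero => intros; rfl
  | succ fuel ih =>
    intro orig mixed i j K answer hj
    simp only [pvLoopBP, pvLoopB]
    have hm : (if mixed.length ≤ j ∨ (i < orig.length ∧ orig.getD i 0 ≤ mixed.getD j 0)
               then orig.getD i 0 else mixed.getD j 0)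
        = (if mixed.drop j = [] ∨ (orig.drop i ≠ [] ∧
              (orig.drop i).getD 0 0 ≤ (mixed.drop j).getD 0 0)
           then (orig.drop i).getD 0 0 else (mixed.drop j).getD 0 0) := by
      rw [pv_getD_drop, pv_getD_drop]
      refine if_congr ?_ rfl rfl
      rw [List.drop_eq_nil_iff, ne_eq, List.drop_eq_nil_iff]
      constructor
      · rintro (h | ⟨h1, h2⟩); exacts [Or.inl h, Or.inr ⟨by omega, h2⟩]
      · rintro (h | ⟨h1, h2⟩); exacts [Or.inl h, Or.inr ⟨by omega, h2⟩]
    rw [← hm]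
    have hlen : (orig.drop i).length + (mixed.drop j).length
        = (orig.length - i) + (mixed.length - j) := by
      simp [List.length_drop]
    by_cases hK : K ≤ (if mixed.length ≤ j ∨ (i < orig.length ∧ orig.getD i 0 ≤ mixed.getD j 0)
               then orig.getD i 0 else mixed.getD j 0)
    · rw [if_pos hK, if_pos hK]
    · rw [if_neg hK, if_neg hK]
      by_cases h1 : (orig.length - i) + (mixed.length - j) = 1
      · rw [if_pos h1, if_pos (by omega)]
      · rw [if_neg h1, if_neg (by omega)]
        obtain ⟨e1, e2, e3, e4⟩ := pv_popMinP_bridge orig mixed i j hj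
        obtain ⟨f1, f2, f3, f4⟩ := pv_popMinP_bridge orig mixed
          (pvPopMinP orig i mixed j).2.1 (pvPopMinP orig i mixed j).2.2 e4
        rw [e2, e3] at f1 f2 f3
        rw [ih orig (mixed ++ [(pvPopMinP orig i mixed j).1
              + (pvPopMinP orig (pvPopMinP orig i mixed j).2.1 mixed
                  (pvPopMinP orig i mixed j).2.2).1 * 2])
            (pvPopMinP orig (pvPopMinP orig i mixed j).2.1 mixed
                  (pvPopMinP orig i mixed j).2.2).2.1
            (pvPopMinP orig (pvPopMinP orig i mixed j).2.1 mixed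
                  (pvPopMinP orig i mixed j).2.2).2.2 K (answer + 1)
            (by simp only [List.length_append]; omega)]
        rw [List.drop_append_of_le_length f4, e1, f1, f2, f3]

lemma pv_sorted_head_le (l : List Int) (hl : l.Pairwise (· ≤ ·)) :
    ∀ x ∈ l, l.getD 0 0 ≤ x := by
  cases l with
  | nil => intro x hx; simp at hx
  | cons a t =>
    intro x hx
    rcases List.mem_cons.1 hx with rfl | hx'
    · simp
    · simpa using (List.pairwise_cons.1 hl).1 x hx'

lemma pv_getLastD_mem (l : List Int) (hl : l ≠ []) : l.getLastD 0 ∈ l := by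
  induction l with
  | nil => exact absurd rfl hl
  | cons a t ih =>
    cases t with
    | nil => simp
    | cons b u => simpa using Or.inr (ih (by simp))

lemma pv_sorted_le_last (l : List Int) (hl : l.Pairwise (· ≤ ·)) :
    ∀ x ∈ l, x ≤ l.getLastD 0 := by
  induction l with
  | nil => intro x hx; simp at hx
  | cons a t ih =>
    intro x hx
    cases t with
    | nil => simp at hx; simp [hx]
    | cons b u =>
      rcases List.mem_cons.1 hx with rfl | hx'
      · calc x ≤ (b :: u).getLastD 0 :=
              (List.pairwise_cons.1 hl).1 _ (pv_getLastD_mem (b :: u) (by simp))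
          _ = (x :: b :: u).getLastD 0 := by simp
      · have := ih (List.pairwise_cons.1 hl).2 x hx'
        simpa using this

lemma pv_min_unique {x x' : Int} {l l' : List Int} (hp : l.Perm l')
    (hx : x ∈ l) (hxm : ∀ y ∈ l, x ≤ y) (hx' : x' ∈ l') (hxm' : ∀ y ∈ l', x' ≤ y) : x = x' :=
  le_antisymm (hxm _ (hp.symm.subset hx')) (hxm' _ (hp.subset hx))

-- the displayed head m is the minimum of the pool
lemma pv_head_spec (oq mq : List Int) (hoq : oq.Pairwise (· ≤ ·)) (hmq : mq.Pairwise (· ≤ ·))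
    (hne : oq ++ mq ≠ []) :
    (if mq = [] ∨ (oq ≠ [] ∧ oq.getD 0 0 ≤ mq.getD 0 0)
     then oq.getD 0 0 else mq.getD 0 0) ∈ oq ++ mq ∧
    ∀ x ∈ oq ++ mq, (if mq = [] ∨ (oq ≠ [] ∧ oq.getD 0 0 ≤ mq.getD 0 0)
     then oq.getD 0 0 else mq.getD 0 0) ≤ x := by
  split_ifs with h
  · have hoqne : oq ≠ [] := by
      rcases h with h | h
      · intro hx; exact hne (by rw [hx, h]; rfl)
      · exact h.1
    constructor
    · exact List.mem_append.2 (Or.inl (pv_getD_mem oq 0 (List.length_pos_of_ne_nil hoqne)))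
    · intro x hx
      rcases List.mem_append.1 hx with hx | hx
      · exact pv_sorted_head_le oq hoq x hx
      · rcases h with h | h
        · rw [h] at hx; simp at hx
        · exact le_trans h.2 (pv_sorted_head_le mq hmq x hx)
  · push_neg at h
    have hmqne : mq ≠ [] := h.1
    constructor
    · exact List.mem_append.2 (Or.inr (pv_getD_mem mq 0 (List.length_pos_of_ne_nil hmqne)))
    · intro x hx
      rcases List.mem_append.1 hx with hx | hx
      · have hoqne : oq ≠ [] := by intro hz; rw [hz] at hx; simp at hx
        exact le_trans (le_of_lt (h.2 hoqne)) (pv_sorted_head_le oq hoq x hx)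
      · exact pv_sorted_head_le mq hmq x hx

lemma pv_popMin_spec (oq mq : List Int) (hoq : oq.Pairwise (· ≤ ·)) (hmq : mq.Pairwise (· ≤ ·))
    (hne : oq ++ mq ≠ []) :
    ((pvPopMin oq mq).1 :: ((pvPopMin oq mq).2.1 ++ (pvPopMin oq mq).2.2)).Perm (oq ++ mq)
  ∧ (∀ x ∈ oq ++ mq, (pvPopMin oq mq).1 ≤ x)
  ∧ ((pvPopMin oq mq).1 = mq.getD 0 0 ∧ (pvPopMin oq mq).2.1 = oq
       ∧ (pvPopMin oq mq).2.2 = mq.drop 1 ∧ mq ≠ []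
     ∨ (pvPopMin oq mq).1 = oq.getD 0 0 ∧ (pvPopMin oq mq).2.1 = oq.drop 1
       ∧ (pvPopMin oq mq).2.2 = mq ∧ oq ≠ []) := by
  unfold pvPopMin
  split_ifs with h
  · obtain ⟨hmqne, hcmp⟩ := h
    obtain ⟨m0, mt, rfl⟩ : ∃ m0 mt, mq = m0 :: mt := by
      cases mq with
      | nil => exact absurd rfl hmqne
      | cons m0 mt => exact ⟨m0, mt, rfl⟩
    refine ⟨by simpa using List.perm_middle.symm, ?_, Or.inl ⟨rfl, rfl, rfl, hmqne⟩⟩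
    intro x hx
    rcases List.mem_append.1 hx with hx | hx
    · have hoqne : oq ≠ [] := by intro hz; rw [hz] at hx; simp at hx
      rcases hcmp with hz | hcmp
      · exact absurd hz hoqne
      · exact le_trans (by simpa using hcmp) (pv_sorted_head_le oq hoq x hx)
    · simpa using pv_sorted_head_le (m0 :: mt) hmq x hx
  · have hoqne : oq ≠ [] := by
      intro hz
      subst hz
      simp only [List.nil_append] at hne
      exact h ⟨hne, Or.inl rfl⟩
    obtain ⟨o0, ot, rfl⟩ : ∃ o0 ot, oq = o0 :: ot := by
      cases oq with
      | nil => exact absurd rfl hoqne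
      | cons o0 ot => exact ⟨o0, ot, rfl⟩
    refine ⟨by simp, ?_, Or.inr ⟨rfl, rfl, rfl, hoqne⟩⟩
    intro x hx
    rcases List.mem_append.1 hx with hx | hx
    · simpa using pv_sorted_head_le (o0 :: ot) hoq x hx
    · have hmqne : mq ≠ [] := by intro hz; rw [hz] at hx; simp at hx
      have hlt : ¬ mq.getD 0 0 ≤ (o0 :: ot).getD 0 0 := by
        intro hle; exact h ⟨hmqne, Or.inr hle⟩
      simp only [List.getD_cons_zero] at hlt ⊢
      exact le_trans (le_of_lt (not_le.1 hlt)) (pv_sorted_head_le mq hmq x hx)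

lemma pv_sorted_drop (l : List Int) (hl : l.Pairwise (· ≤ ·)) (n : Nat) :
    (l.drop n).Pairwise (· ≤ ·) :=
  hl.sublist (List.drop_sublist n l)

lemma pv_getD_mem_dropLast (l : List Int) (i : Nat) (h : i + 1 < l.length) :
    l.getD i 0 ∈ l.dropLast := by
  rw [← pv_getD_dropLast l i (by omega)]
  exact pv_getD_mem _ i (by simp only [List.length_dropLast]; omega)

-- every still-queued product stays ≤ the new product a + b*2
lemma pv_append_last_bound (oq mq : List Int) (a b : Int) (hmq : mq.Pairwise (· ≤ ·))
    (hgap : mq ≠ [] → ∀ x ∈ oq ++ mq.dropLast, mq.getLastD 0 ≤ 3 * x)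
    (hab : a ≤ b) (ha : a ∈ oq ++ mq.dropLast) :
    ∀ w ∈ mq, w ≤ a + b * 2 := by
  intro w hw
  have hmqne : mq ≠ [] := by intro hz; rw [hz] at hw; simp at hw
  have h1 : w ≤ mq.getLastD 0 := pv_sorted_le_last mq hmq w hw
  have h2 : mq.getLastD 0 ≤ 3 * a := hgap hmqne a ha
  omega

-- the two loops in lockstep
lemma pv_loop_eq (fuel : Nat) (heap oq mq : List Int) (K answer : Int)
    (hperm : heap.Perm (oq ++ mq)) (hheap : PVIsHeap heap)
    (hoq : oq.Pairwise (· ≤ ·)) (hmq : mq.Pairwise (· ≤ ·))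
    (hgap : mq ≠ [] → ∀ x ∈ oq ++ mq.dropLast, mq.getLastD 0 ≤ 3 * x)
    (hne : heap ≠ []) (hfuel : heap.length ≤ fuel) :
    pvLoopA heap K answer fuel = pvLoopB oq mq K answer fuel := by
  induction fuel generalizing heap oq mq answer with
  | zero => rfl
  | succ fuel ih =>
    have hpoolne : oq ++ mq ≠ [] := by
      intro hz
      exact hne (List.length_eq_zero_iff.1 (by rw [hperm.length_eq, hz]; rfl))
    have hhl : 0 < heap.length := List.length_pos_of_ne_nil hne
    -- the roots agree
    obtain ⟨hmmem, hmmin⟩ := pv_head_spec oq mq hoq hmq hpoolne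
    have hrootmem : heap.getD 0 0 ∈ oq ++ mq := hperm.subset (pv_getD_mem heap 0 hhl)
    have hrootmin : ∀ x ∈ oq ++ mq, heap.getD 0 0 ≤ x := by
      intro x hx
      obtain ⟨i, hilen, hia⟩ := List.mem_iff_getElem.1 (hperm.mem_iff.2 hx)
      have := pv_isHeap_root_min heap hheap i hilen
      rwa [List.getD_eq_getElem _ 0 hilen, hia] at this
    have hroot : heap.getD 0 0
        = (if mq = [] ∨ (oq ≠ [] ∧ oq.getD 0 0 ≤ mq.getD 0 0)
           then oq.getD 0 0 else mq.getD 0 0) :=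
      pv_min_unique (List.Perm.refl _) hrootmem hrootmin hmmem hmmin
    have hlen : heap.length = oq.length + mq.length := by
      rw [hperm.length_eq, List.length_append]
    by_cases hK : heap.getD 0 0 < K
    · have hKm : ¬ K ≤ (if mq = [] ∨ (oq ≠ [] ∧ oq.getD 0 0 ≤ mq.getD 0 0)
          then oq.getD 0 0 else mq.getD 0 0) := by rw [← hroot]; omega
      by_cases h1 : heap.length = 1
      · simp only [pvLoopA, pvLoopB]
        rw [if_pos hK, if_pos h1, if_neg hKm, if_pos (show oq.length + mq.length = 1 by omega)]
      · simp only [pvLoopA, pvLoopB]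
        rw [if_pos hK, if_neg h1, if_neg hKm,
            if_neg (show ¬ oq.length + mq.length = 1 by omega)]
        have hlen2 : 2 ≤ heap.length := by omega
        -- B's first pop
        obtain ⟨hq1perm, hq1min, hq1str⟩ := pv_popMin_spec oq mq hoq hmq hpoolne
        set a := (pvPopMin oq mq).1 with hadef
        set oq1 := (pvPopMin oq mq).2.1 with hoq1def
        set mq1 := (pvPopMin oq mq).2.2 with hmq1def
        have hamem : a ∈ oq ++ mq := hq1perm.subset (List.mem_cons_self ..)
        have hoq1s : oq1.Pairwise (· ≤ ·) := by
          rcases hq1str with ⟨_, h2, _, _⟩ | ⟨_, h2, _, _⟩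
          · rw [h2]; exact hoq
          · rw [h2]; exact pv_sorted_drop oq hoq 1
        have hmq1s : mq1.Pairwise (· ≤ ·) := by
          rcases hq1str with ⟨_, _, h3, _⟩ | ⟨_, _, h3, _⟩
          · rw [h3]; exact pv_sorted_drop mq hmq 1
          · rw [h3]; exact hmq
        have hq1len : (oq1 ++ mq1).length + 1 = (oq ++ mq).length := by
          have := hq1perm.length_eq
          simpa using this
        have hq1ne : oq1 ++ mq1 ≠ [] := by
          intro hz
          rw [hz] at hq1len
          simp at hq1len
          omega
        -- B's second pop
        obtain ⟨hq2perm, hq2min, hq2str⟩ := pv_popMin_spec oq1 mq1 hoq1s hmq1s hq1ne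
        set b := (pvPopMin oq1 mq1).1 with hbdef
        set oq2 := (pvPopMin oq1 mq1).2.1 with hoq2def
        set mq2 := (pvPopMin oq1 mq1).2.2 with hmq2def
        have hbmem1 : b ∈ oq1 ++ mq1 := hq2perm.subset (List.mem_cons_self ..)
        have hbmem : b ∈ oq ++ mq := hq1perm.subset (List.mem_cons_of_mem _ hbmem1)
        have hab : a ≤ b := hq1min b hbmem
        have hoq2s : oq2.Pairwise (· ≤ ·) := by
          rcases hq2str with ⟨_, h2, _, _⟩ | ⟨_, h2, _, _⟩
          · rw [h2]; exact hoq1s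
          · rw [h2]; exact pv_sorted_drop oq1 hoq1s 1
        have hmq2s : mq2.Pairwise (· ≤ ·) := by
          rcases hq2str with ⟨_, _, h3, _⟩ | ⟨_, _, h3, _⟩
          · rw [h3]; exact pv_sorted_drop mq1 hmq1s 1
          · rw [h3]; exact hmq1s
        -- A's first pop matches
        have hcons : heap.getD 0 0 :: heap.drop 1 = heap := by
          cases heap with
          | nil => exact absurd rfl hne
          | cons x xs => simp
        have hra : heap.getD 0 0 = a :=
          pv_min_unique (List.Perm.refl _) hrootmem hrootmin hamem hq1min
        have hp1fst : (pvHeappop heap).1 = a := by rw [pv_heappop_fst heap hne, hra]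
        have hp1perm : (pvHeappop heap).2.Perm (oq1 ++ mq1) := by
          have hdrop := pv_heappop_perm heap hne
          have hx : (heap.getD 0 0 :: heap.drop 1).Perm (a :: (oq1 ++ mq1)) := by
            rw [hcons]; exact hperm.trans hq1perm.symm
          rw [hra] at hx
          exact hdrop.trans hx.cons_inv
        have hp1heap := pv_heappop_isHeap heap hheap
        have hp1ne : (pvHeappop heap).2 ≠ [] := by
          intro hx
          have h5 := hp1perm.length_eq
          rw [hx] at h5
          have h6 := hq1len
          simp only [List.length_nil, List.length_append] at h5 h6
          omega
        -- A's second pop matches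
        have hp1hl : 0 < (pvHeappop heap).2.length := List.length_pos_of_ne_nil hp1ne
        have hr2mem : (pvHeappop heap).2.getD 0 0 ∈ oq1 ++ mq1 :=
          hp1perm.subset (pv_getD_mem _ 0 hp1hl)
        have hr2min : ∀ x ∈ oq1 ++ mq1, (pvHeappop heap).2.getD 0 0 ≤ x := by
          intro x hx
          obtain ⟨i, hilen, hia⟩ := List.mem_iff_getElem.1 (hp1perm.mem_iff.2 hx)
          have := pv_isHeap_root_min _ hp1heap i hilen
          rwa [List.getD_eq_getElem _ 0 hilen, hia] at this
        have hrb : (pvHeappop heap).2.getD 0 0 = b :=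
          pv_min_unique (List.Perm.refl _) hr2mem hr2min hbmem1 hq2min
        have hp2fst : (pvHeappop (pvHeappop heap).2).1 = b := by
          rw [pv_heappop_fst _ hp1ne, hrb]
        have hp2perm : (pvHeappop (pvHeappop heap).2).2.Perm (oq2 ++ mq2) := by
          have hdrop := pv_heappop_perm _ hp1ne
          have hcons2 : (pvHeappop heap).2.getD 0 0 :: (pvHeappop heap).2.drop 1
              = (pvHeappop heap).2 := by
            cases hx : (pvHeappop heap).2 with
            | nil => exact absurd hx hp1ne
            | cons y ys => simp
          have hx : ((pvHeappop heap).2.getD 0 0 :: (pvHeappop heap).2.drop 1).Perm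
              (b :: (oq2 ++ mq2)) := by
            rw [hcons2]; exact hp1perm.trans hq2perm.symm
          rw [hrb] at hx
          exact hdrop.trans hx.cons_inv
        have hp2heap := pv_heappop_isHeap _ hp1heap
        -- a is in the pool minus one copy of mq's last element (when products survive)
        have hamem' : mq2 ≠ [] → a ∈ oq ++ mq.dropLast := by
          intro hmq2ne
          have hmq1ne : mq1 ≠ [] := by
            rcases hq2str with ⟨_, _, h3, _⟩ | ⟨_, _, h3, _⟩
            · intro hz; rw [hz] at h3; simp at h3; exact hmq2ne h3
            · intro hz; rw [← h3] at hz; exact hmq2ne hz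
          rcases hq1str with ⟨h1, _, h3, h4⟩ | ⟨h1, _, _, h4⟩
          · -- a came from the front of mq, and mq1 = mq.drop 1 ≠ []
            have hlenmq : 2 ≤ mq.length := by
              by_contra hc
              have : mq.drop 1 = [] := by
                rw [← List.length_eq_zero_iff]
                simp
                omega
              rw [← h3] at this
              exact hmq1ne this
            rw [h1]
            exact List.mem_append.2 (Or.inr (pv_getD_mem_dropLast mq 0 (by omega)))
          · rw [h1]
            exact List.mem_append.2
              (Or.inl (pv_getD_mem oq 0 (List.length_pos_of_ne_nil h4)))
        -- one synchronized step
        rw [hp1fst, hp2fst]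
        apply ih
        · -- permutation for the next state
          refine (pv_heappush_perm _ _).trans ?_
          refine ((hp2perm).cons _).trans ?_
          have : (oq2 ++ (mq2 ++ [a + b * 2])) = (oq2 ++ mq2) ++ [a + b * 2] := by
            rw [List.append_assoc]
          rw [this]
          exact (List.perm_append_singleton _ _).symm
        · exact pv_heappush_isHeap _ _ hp2heap
        · exact hoq2s
        · -- mq2 ++ [v] is sorted
          rw [List.pairwise_append]
          refine ⟨hmq2s, List.pairwise_singleton _ _, ?_⟩
          intro w hw v hv
          rw [List.mem_singleton.1 hv]
          have hwmq : w ∈ mq := by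
            have hw1 : w ∈ mq1 := by
              rcases hq2str with ⟨_, _, h3, _⟩ | ⟨_, _, h3, _⟩
              · rw [h3] at hw; exact List.mem_of_mem_drop hw
              · rw [h3] at hw; exact hw
            rcases hq1str with ⟨_, _, h3, _⟩ | ⟨_, _, h3, _⟩
            · rw [h3] at hw1; exact List.mem_of_mem_drop hw1
            · rw [h3] at hw1; exact hw1
          exact pv_append_last_bound oq mq a b hmq hgap hab
            (hamem' (by intro hz; rw [hz] at hw; simp at hw)) w hwmq
        · -- gap invariant for the next state
          intro _ x hx
          have hxmem : x ∈ oq2 ++ mq2 := by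
            rcases List.mem_append.1 hx with hx | hx
            · exact List.mem_append.2 (Or.inl hx)
            · rw [List.dropLast_concat] at hx
              exact List.mem_append.2 (Or.inr hx)
          have hbx : b ≤ x := hq2min x (hq2perm.subset (List.mem_cons_of_mem _ hxmem))
          have hlast : (mq2 ++ [a + b * 2]).getLastD 0 = a + b * 2 := by
            simp
          rw [hlast]
          omega
        · -- nonempty
          intro hx
          have := congrArg List.length hx
          rw [(pv_heappush_perm _ _).length_eq] at this
          simp at this
        · -- fuel
          have e1 := (pv_heappush_perm (pvHeappop (pvHeappop heap).2).2 (a + b * 2)).length_eq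
          have e2 := hp2perm.length_eq
          have e3 := hp1perm.length_eq
          have e4 := hq1len
          have e5 := hq2perm.length_eq
          simp only [List.length_cons, List.length_append] at e1 e2 e3 e4 e5 ⊢
          have hlenheap : heap.length = (oq ++ mq).length := hperm.length_eq
          simp only [List.length_append] at hlenheap
          omega
    · have hKm : K ≤ (if mq = [] ∨ (oq ≠ [] ∧ oq.getD 0 0 ≤ mq.getD 0 0)
          then oq.getD 0 0 else mq.getD 0 0) := by rw [← hroot]; omega
      simp only [pvLoopA, pvLoopB]
      rw [if_neg hK, if_pos hKm]

lemma pv_heapify (xs : List Int) : ∀ acc : List Int, PVIsHeap acc →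
    (xs.foldl (fun h s => pvHeappush h s) acc).Perm (acc ++ xs) ∧
    PVIsHeap (xs.foldl (fun h s => pvHeappush h s) acc) := by
  induction xs with
  | nil =>
    intro acc hacc
    exact ⟨by simp, hacc⟩
  | cons x xs ih =>
    intro acc hacc
    have h1 := ih (pvHeappush acc x) (pv_heappush_isHeap acc x hacc)
    refine ⟨h1.1.trans ?_, h1.2⟩
    exact ((pv_heappush_perm acc x).append_right xs).trans List.perm_middle.symm

theorem pv_solution_eq (scoville : List Int) (K : Int) (h : scoville ≠ []) :
    solution scoville K = solution_alt scoville K := by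
  unfold solution solution_alt
  rw [pv_loopB_bridge scoville.length (PySem.List.sorted scoville (fun x => x) false) [] 0 0 K 0
      (by simp)]
  simp only [List.drop_zero, List.drop_nil]
  have hf := pv_heapify scoville [] (by intro i hi h1i; simp at hi)
  simp only [List.nil_append] at hf
  have hsp : (PySem.List.sorted scoville (fun x => x) false).Perm scoville :=
    PySem.List.sorted_perm scoville (fun x => x) false
  have hsw : (PySem.List.sorted scoville (fun x => x) false).Pairwise (· ≤ ·) :=
    PySem.List.sorted_pairwise scoville (fun x => x)
  apply pv_loop_eq
  · simpa using hf.1.trans hsp.symm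
  · exact hf.2
  · exact hsw
  · exact List.Pairwise.nil
  · intro hx; exact absurd rfl hx
  · intro hx
    have := congrArg List.length hx
    rw [hf.1.length_eq] at this
    simp at this
    exact h this
  · exact le_of_eq hf.1.length_eq

-- ===== VERDICT =====
theorem solution_spec : Claim_equal_solution := by
  intro scoville K _ hpre
  unfold Spec_solution
  exact pv_solution_eq scoville K hpre
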